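-- pv_equiv track=rewrite | github.com/pranigopu/learningPython | pythonAssignments/semester5/pythonLab/pythonLabAssignment1/registerNumberGenerator.py | processProgramName
-- ===== SOURCE A (Python) =====
-- def processProgramName(program):
--     processedProgramName = str()
--     allowedCharacters = (".", " ", "\t")
--     for i in program:
--         if (i >= "a" and i <= "z") or (i >= "A" and i <= "Z"):
--             processedProgramName = processedProgramName + i.upper()
--         elif i not in allowedCharacters:
--             processedProgramName = "*"
--             break
--     return processedProgramName
-- ===== SOURCE B (Python) =====
-- def processProgramName(program):
--     # pass 1: validate; pass 2: build the uppercased-letters-only name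
--     for c in program:
--         if not (("a" <= c <= "z") or ("A" <= c <= "Z") or c in (".", " ", "\t")):
--             return "*"
--     return "".join(
--         (chr(ord(c) - 32) if "a" <= c <= "z" else c)
--         for c in program
--         if ("a" <= c <= "z") or ("A" <= c <= "Z")
--     )
-- ===== Notes on version B (the rewrite author's own statement) =====
-- stated objective: alternative
-- what changed: Replaces A's single interleaved accumulate-with-early-break loop by a separate validation pass followed by a filter-and-uppercase build pass.
import Mathlib
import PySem

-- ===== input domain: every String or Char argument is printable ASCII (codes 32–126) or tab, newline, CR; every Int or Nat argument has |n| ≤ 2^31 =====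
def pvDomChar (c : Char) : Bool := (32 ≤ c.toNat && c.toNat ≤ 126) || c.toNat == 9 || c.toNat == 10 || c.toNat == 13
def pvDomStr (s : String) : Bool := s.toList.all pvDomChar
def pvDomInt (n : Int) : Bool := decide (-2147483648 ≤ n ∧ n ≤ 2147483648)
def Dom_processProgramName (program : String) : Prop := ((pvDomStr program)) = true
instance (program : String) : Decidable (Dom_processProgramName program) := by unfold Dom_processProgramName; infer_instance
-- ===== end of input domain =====

-- B replaces A's interleaved accumulate-with-early-break loop by a validate pass then a filter/uppercase build pass (alternative decomposition, same cost).


-- ===== PORT A =====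
-- 'a' <= i <= 'z'  /  'A' <= i <= 'Z'  (Python compares code points; exact for all Char)
def pvIsLower (c : Char) : Bool := 'a' ≤ c && c ≤ 'z'
def pvIsUpper (c : Char) : Bool := 'A' ≤ c && c ≤ 'Z'
-- i.upper(): exact here because A applies it only to ASCII letters
def pvUp (c : Char) : Char := if pvIsLower c then Char.ofNat (c.toNat - 32) else c

def pvGoA : List Char → List Char → List Char
  | [], acc => acc
  | c :: cs, acc =>
    if pvIsLower c || pvIsUpper c then pvGoA cs (acc ++ [pvUp c])
    else if c = '.' || c = ' ' || c = '\t' then pvGoA cs acc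
    else ['*']

def processProgramName (program : String) : String :=
  String.ofList (pvGoA program.toList [])

-- ===== PORT B =====
def pvValid : List Char → Bool
  | [] => true
  | c :: cs =>
    if pvIsLower c || pvIsUpper c || c = '.' || c = ' ' || c = '\t' then pvValid cs
    else false

def processProgramName_alt (program : String) : String :=
  if pvValid program.toList then
    String.ofList ((program.toList.filter (fun c => pvIsLower c || pvIsUpper c)).map pvUp)
  else "*"

-- ===== PRECONDITION & SPEC =====
def Spec_processProgramName (program : String) (out : String) : Prop := out = processProgramName_alt program
instance (program : String) (out : String) : Decidable (Spec_processProgramName program out) := by unfold Spec_processProgramName; infer_instance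

-- ===== CLAIM (what is proved, stated in full; the proofs are below) =====
def Claim_equal_processProgramName : Prop := ∀ (program : String), Dom_processProgramName program → Spec_processProgramName program (processProgramName program)

-- ===== LEMMAS AND PROOFS =====
theorem pvGoA_eq (cs : List Char) : ∀ acc,
    pvGoA cs acc =
      if pvValid cs then acc ++ (cs.filter (fun c => pvIsLower c || pvIsUpper c)).map pvUp
      else ['*'] := by
  induction cs with
  | nil => intro acc; simp [pvGoA, pvValid]
  | cons c cs ih =>
    intro acc
    by_cases hL : (pvIsLower c || pvIsUpper c) = true
    · simp [pvGoA, pvValid, hL, ih]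
    · by_cases hA : (c = '.' || c = ' ' || c = '\t') = true
      · have hc : c ≠ '*' := by
          rcases Bool.or_eq_true_iff.mp hA with h | h
          · rcases Bool.or_eq_true_iff.mp h with h | h <;>
              simp_all [decide_eq_true_eq]
          · simp_all [decide_eq_true_eq]
        simp [pvGoA, pvValid, hL, hA, ih]
      · simp [pvGoA, pvValid, hL, hA]

-- ===== VERDICT (by name: the statement is the Claim_ definition above) =====
theorem processProgramName_spec : Claim_equal_processProgramName := by
  intro program _
  unfold Spec_processProgramName processProgramName processProgramName_alt
  rw [pvGoA_eq]
  split <;> rfl
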